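-- pv_equiv track=rewrite | github.com/tejaschauhan373/DSA | Math/number_is_a_sum_of_power_three.py | recursive_check
-- ===== SOURCE A (Python) =====
-- def recursive_check(n: int, ans):
--     if n < 1:
--         return False
--     i = 0
--     temp = 3 ** i
--     while temp <= n:
--         i += 1
--         temp = 3 ** i
--     if i - 1 not in ans:
--         ans[i - 1] = n
--     else:
--         return False
--     if 3 ** (i - 1) == n:
--         return True
--     else:
--         return recursive_check(n - 3 ** (i - 1), ans)
-- ===== SOURCE B (Python) =====
-- def recursive_check(n: int, ans):
--     # Base-3 digit scan: n is a sum of distinct powers of three not already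
--     # recorded in ans iff no base-3 digit of n is 2 and no exponent whose
--     # digit is 1 is a key of ans.  Return-value equivalent to A; unlike A it
--     # does not mutate ans.
--     if n < 1:
--         return False
--     k = 0
--     m = n
--     while m:
--         m, d = divmod(m, 3)
--         if d == 2 or (d == 1 and k in ans):
--             return False
--         k += 1
--     return True
-- ===== Notes on version B (the rewrite author's own statement) =====
-- stated objective: simpler
-- what changed: Replaced A's recursion that re-searches the largest power of three at every step (and records used exponents in ans) by a single low-to-high base-3 digit scan rejecting any digit 2 or a digit-1 exponent already in ans; B does not mutate ans.
import Mathlib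
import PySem

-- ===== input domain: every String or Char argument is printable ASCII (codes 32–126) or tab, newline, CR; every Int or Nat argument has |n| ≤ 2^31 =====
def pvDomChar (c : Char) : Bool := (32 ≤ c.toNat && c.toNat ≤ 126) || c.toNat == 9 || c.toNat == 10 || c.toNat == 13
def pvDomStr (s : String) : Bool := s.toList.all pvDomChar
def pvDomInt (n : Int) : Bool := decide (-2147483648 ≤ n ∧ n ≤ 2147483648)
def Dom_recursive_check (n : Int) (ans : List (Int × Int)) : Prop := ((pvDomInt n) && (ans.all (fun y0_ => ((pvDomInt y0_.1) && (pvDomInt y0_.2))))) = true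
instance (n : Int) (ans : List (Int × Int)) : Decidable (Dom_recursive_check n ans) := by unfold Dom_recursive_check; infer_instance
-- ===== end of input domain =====

-- B replaces A's recursive greedy search for the largest power of three by a single
-- base-3 digit scan (simpler); equivalence is about the RETURN value only: A mutates
-- ans in place (records used exponents), B does not.

-- ===== PORT A =====
-- A's inner `while temp <= n` loop: starting from exponent i, increment while 3^i ≤ n.
def findPow (n : Int) (i : Nat) : Nat :=
  if (3:Int)^i ≤ n then findPow n (i+1) else i
termination_by (n + 1 - (3:Int)^i).toNat
decreasing_by
  have h1 : (0:Int) < 3^i := by positivity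
  omega

-- A's body, carrying the dict state the Python mutates.
def Aloop (n : Int) (d : PySem.Dict Int Int) : Bool :=
  if n < 1 then false
  else
    let i := findPow n 0
    if d.contains ((i:Int) - 1) then false
    else if (3:Int)^(i-1) = n then true
    else Aloop (n - (3:Int)^(i-1)) (d.insert ((i:Int)-1) n)
termination_by n.toNat
decreasing_by
  have h1 : (0:Int) < 3^(findPow n 0 - 1) := by positivity
  omega

def recursive_check (n : Int) (ans : List (Int × Int)) : Bool :=
  Aloop n (PySem.Dict.mk ans)

-- ===== PORT B =====
-- B's `while m:` loop; m is nonnegative throughout in Source B (it starts at n ≥ 1 and is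
-- floor-divided by 3), so Nat division/modulus are exactly Python's divmod here.
def digitLoop (m : Nat) (k : Int) (d : PySem.Dict Int Int) : Bool :=
  if m = 0 then true
  else
    if m % 3 = 2 ∨ (m % 3 = 1 ∧ d.contains k = true) then false
    else digitLoop (m / 3) (k + 1) d
termination_by m
decreasing_by exact Nat.div_lt_self (by omega) (by omega)

def recursive_check_alt (n : Int) (ans : List (Int × Int)) : Bool :=
  if n < 1 then false
  else digitLoop n.toNat 0 (PySem.Dict.mk ans)

-- ===== PRECONDITION & SPEC =====
def Spec_recursive_check (n : Int) (ans : List (Int × Int)) (out : Bool) : Prop := out = recursive_check_alt n ans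
instance (n : Int) (ans : List (Int × Int)) (out : Bool) : Decidable (Spec_recursive_check n ans out) := by unfold Spec_recursive_check; infer_instance

-- ===== CLAIM (what is proved, stated in full; the proofs are below) =====
def Claim_equal_recursive_check : Prop := ∀ (n : Int) (ans : List (Int × Int)), Dom_recursive_check n ans → Spec_recursive_check n ans (recursive_check n ans)

-- ===== LEMMAS AND PROOFS =====

-- base-3 digit of N at place j
def dig (N j : Nat) : Nat := N / 3^j % 3

theorem dig_zero (N : Nat) : dig N 0 = N % 3 := by simp [dig]

theorem dig_succ (N j : Nat) : dig N (j+1) = dig (N/3) j := by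
  simp [dig, Nat.div_div_eq_div_mul, pow_succ']

theorem dig_eq_mod (N j : Nat) : dig N j = N % 3^(j+1) / 3^j := by
  rw [dig, pow_succ, ← Nat.mod_mul_right_div_self]

theorem dig_eq_zero_of_lt {N j : Nat} (h : N < 3^j) : dig N j = 0 := by
  simp [dig, Nat.div_eq_of_lt h]

theorem dig_zero_N (j : Nat) : dig 0 j = 0 := by simp [dig]

theorem dig_pow (k j : Nat) : dig (3^k) j = if j = k then 1 else 0 := by
  rcases lt_trichotomy j k with h | h | h
  · have hdvd : 3^j * 3 ∣ 3^k := by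
      have : 3^(j+1) ∣ 3^k := pow_dvd_pow 3 (by omega)
      simpa [pow_succ] using this
    obtain ⟨t, ht⟩ := hdvd
    simp only [dig, if_neg (by omega : ¬ j = k)]
    rw [ht, Nat.mul_assoc, Nat.mul_div_cancel_left _ (by positivity : 0 < 3^j)]
    simp
  · subst h; simp [dig, Nat.div_self (by positivity : 0 < 3^j)]
  · have : 3^k < 3^j := Nat.pow_lt_pow_right (by omega) h
    simp [dig_eq_zero_of_lt this, if_neg (by omega : ¬ j = k)]

theorem dig_sub_pow_lt {N k j : Nat} (h1 : 3^k ≤ N) (hj : j < k) :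
    dig (N - 3^k) j = dig N j := by
  have hdvd : (3:Nat)^(j+1) ∣ 3^k := pow_dvd_pow 3 (by omega)
  obtain ⟨t, ht⟩ := hdvd
  rw [dig_eq_mod, dig_eq_mod]
  congr 1
  have hNsum : N = (N - 3^k) + 3^(j+1) * t := by rw [← ht]; omega
  conv_rhs => rw [hNsum]
  rw [Nat.add_mul_mod_self_left]

theorem sub_div_self {N M : Nat} (hp : 0 < M) (h : M ≤ N) : (N - M) / M = N / M - 1 := by
  have hq1 : 1 ≤ N / M := (Nat.one_le_div_iff hp).mpr h
  obtain ⟨q, hq⟩ : ∃ q, N / M = q + 1 := ⟨N / M - 1, by omega⟩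
  have hmod : N % M < M := Nat.mod_lt _ hp
  have hsplit : M * (N / M) + N % M = N := Nat.div_add_mod N M
  have hsub : N - M = M * q + N % M := by
    rw [hq, Nat.mul_add, Nat.mul_one] at hsplit
    omega
  rw [hsub, Nat.mul_add_div hp, Nat.div_eq_of_lt hmod, hq]
  omega

theorem dig_sub_pow {N k : Nat} (h1 : 3^k ≤ N) (h2 : N < 3^(k+1)) :
    dig (N - 3^k) k = dig N k - 1 := by
  have hpos : 0 < (3:Nat)^k := by positivity
  have hqlt : N / 3^k < 3 := by
    rw [Nat.div_lt_iff_lt_mul hpos]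
    calc N < 3^(k+1) := h2
    _ = 3 * 3^k := by ring
  have hq1 : 1 ≤ N / 3^k := (Nat.one_le_div_iff hpos).mpr h1
  have h4 : dig (N - 3^k) k = (N / 3^k - 1) % 3 := by rw [dig, sub_div_self hpos h1]
  have h5 : dig N k = N / 3^k := by simp [dig, Nat.mod_eq_of_lt hqlt]
  rw [h4, Nat.mod_eq_of_lt (by omega), h5]

theorem findPow_gt (n : Int) (i : Nat) : n < (3:Int)^(findPow n i) := by
  fun_induction findPow with
  | case1 i h ih => exact ih
  | case2 i h => omega

theorem findPow_le (n : Int) (i : Nat) (h : (3:Int)^i ≤ n) :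
    (3:Int)^(findPow n i - 1) ≤ n ∧ i < findPow n i := by
  fun_induction findPow with
  | case1 i h' ih =>
    by_cases h2 : (3:Int)^(i+1) ≤ n
    · have := ih h2; omega
    · rw [findPow, if_neg h2]
      refine ⟨by simpa using h', by omega⟩
  | case2 i h' => exact absurd h h'

theorem digitLoop_iff (m : Nat) (k : Int) (d : PySem.Dict Int Int) :
    digitLoop m k d = true ↔
      ∀ j : Nat, dig m j ≤ 1 ∧ (dig m j = 1 → d.contains (k + (j:Int)) = false) := by
  induction m using Nat.strong_induction_on generalizing k with
  | _ m IH =>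
  by_cases hm : m = 0
  · subst hm
    rw [digitLoop]
    simp [dig_zero_N]
  · rw [digitLoop, if_neg hm]
    by_cases hc : m % 3 = 2 ∨ (m % 3 = 1 ∧ d.contains k = true)
    · rw [if_pos hc]
      simp only [Bool.false_eq_true, false_iff]
      intro hR
      obtain ⟨h1, h2⟩ := hR 0
      rw [dig_zero] at h1 h2
      rcases hc with hc | ⟨hc1, hc2⟩
      · omega
      · have := h2 hc1
        simp at this
        rw [hc2] at this
        exact absurd this (by simp)
    · rw [if_neg hc]
      have hc1 : ¬ m % 3 = 2 := fun h => hc (Or.inl h)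
      have hc2 : m % 3 = 1 → ¬ d.contains k = true := fun h h' => hc (Or.inr ⟨h, h'⟩)
      rw [IH (m/3) (Nat.div_lt_self (by omega) (by omega)) (k+1)]
      constructor
      · intro h j
        cases j with
        | zero =>
          rw [dig_zero]
          have h3 : m % 3 < 3 := Nat.mod_lt _ (by omega)
          constructor
          · omega
          · intro h1
            simpa using fun h' => (hc2 h1) h'
        | succ j =>
          have := h j
          rw [dig_succ]
          have harith : k + ((j+1 : Nat) : Int) = (k+1) + (j:Int) := by push_cast; ring
          rw [harith]
          exact this
      · intro h j
        have := h (j+1)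
        rw [dig_succ] at this
        have harith : k + ((j+1 : Nat) : Int) = (k+1) + (j:Int) := by push_cast; ring
        rw [harith] at this
        exact this

theorem Aloop_unfold (n : Int) (d : PySem.Dict Int Int) (hn : ¬ n < 1) :
    Aloop n d = (if d.contains ((findPow n 0 : Int) - 1) then false
      else if (3:Int)^(findPow n 0 - 1) = n then true
      else Aloop (n - (3:Int)^(findPow n 0 - 1)) (d.insert ((findPow n 0 : Int) - 1) n)) := by
  rw [Aloop, if_neg hn]

theorem Aloop_iff (N : Nat) (h1 : 1 ≤ N) (d : PySem.Dict Int Int) :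
    Aloop (N:Int) d = true ↔
      ∀ j : Nat, dig N j ≤ 1 ∧ (dig N j = 1 → d.contains (j:Int) = false) := by
  induction N using Nat.strong_induction_on generalizing d with
  | _ N IH =>
  have hn : ¬ ((N:Int) < 1) := by exact_mod_cast not_lt.mpr (by exact_mod_cast h1)
  rw [Aloop_unfold _ _ hn]
  have h0 : (3:Int)^0 ≤ (N:Int) := by simpa using (by exact_mod_cast h1 : (1:Int) ≤ (N:Int))
  obtain ⟨hle, hpos⟩ := findPow_le (N:Int) 0 h0
  have hgt := findPow_gt (N:Int) 0
  set i := findPow (N:Int) 0 with hi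
  set k := i - 1 with hkdef
  have hik : i = k + 1 := by omega
  have hk1 : 3^k ≤ N := by exact_mod_cast hle
  have hk2 : N < 3^(k+1) := by rw [← hik]; exact_mod_cast hgt
  have hkey : ((i:Int) - 1) = (k:Int) := by omega
  -- digit facts at k and above
  have hqlt : N / 3^k < 3 := by
    rw [Nat.div_lt_iff_lt_mul (by positivity : 0 < 3^k)]
    calc N < 3^(k+1) := hk2
    _ = 3 * 3^k := by ring
  have hq1 : 1 ≤ N / 3^k := (Nat.one_le_div_iff (by positivity)).mpr hk1
  have hdk : dig N k = N / 3^k := by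
    simp [dig, Nat.mod_eq_of_lt hqlt]
  have hhigh : ∀ j, k < j → dig N j = 0 := by
    intro j hj
    exact dig_eq_zero_of_lt (lt_of_lt_of_le hk2 (Nat.pow_le_pow_right (by omega) (by omega)))
  rw [hkey]
  by_cases hc : d.contains (k:Int) = true
  · rw [if_pos hc]
    simp only [Bool.false_eq_true, false_iff]
    intro hR
    obtain ⟨ha, hb⟩ := hR k
    have : dig N k = 1 := by omega
    have := hb this
    rw [hc] at this
    exact absurd this (by simp)
  · rw [if_neg hc]
    have hcf : d.contains (k:Int) = false := by
      cases h : d.contains (k:Int) with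
      | true => exact absurd h hc
      | false => rfl
    by_cases heq : (3:Int)^(i-1) = (N:Int)
    · rw [if_pos heq]
      have heqN : 3^k = N := by rw [hkdef] at *; exact_mod_cast heq
      simp only [true_iff]
      intro j
      rw [← heqN, dig_pow]
      by_cases hjk : j = k
      · subst hjk; simp [hcf]
      · simp [hjk]
    · rw [if_neg heq]
      have hlt : 3^k < N := lt_of_le_of_ne hk1 (by intro h; exact heq (by rw [hkdef] at *; exact_mod_cast h))
      set N' := N - 3^k with hN'
      have hcast : (N:Int) - (3:Int)^(k) = ((N':Nat) : Int) := by
        have : ((3^k : Nat) : Int) = (3:Int)^k := by push_cast; ring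
        omega
      have hexp : (3:Int)^(i-1) = (3:Int)^k := by rw [hkdef]
      rw [hexp, hcast]
      have hN'1 : 1 ≤ N' := by omega
      have hN'lt : N' < N := by omega
      rw [IH N' hN'lt hN'1 (d.insert (k:Int) (N:Int))]
      -- digit relations between N' and N
      have hlow : ∀ j, j < k → dig N' j = dig N j := fun j hj => dig_sub_pow_lt hk1 hj
      have hdk' : dig N' k = dig N k - 1 := dig_sub_pow hk1 hk2
      have hhigh' : ∀ j, k < j → dig N' j = 0 := by
        intro j hj
        exact dig_eq_zero_of_lt (lt_of_lt_of_le (by omega : N' < 3^(k+1)) (Nat.pow_le_pow_right (by omega) (by omega)))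
      by_cases hd2 : dig N k = 2
      · -- digit 2: both sides are False
        constructor
        · intro hΦ'
          obtain ⟨ha, hb⟩ := hΦ' k
          have : dig N' k = 1 := by omega
          have hcont := hb this
          rw [PySem.Dict.contains_insert_self] at hcont
          exact absurd hcont (by simp)
        · intro hΦ
          obtain ⟨ha, _⟩ := hΦ k
          omega
      · have hd1 : dig N k = 1 := by omega
        have hdk'0 : dig N' k = 0 := by omega
        have hmidN' : ∀ j, k ≤ j → dig N' j = 0 := by
          intro j hj
          rcases Nat.eq_or_lt_of_le hj with h | h
          · rw [← h]; exact hdk'0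
          · exact hhigh' j h
        constructor
        · intro hΦ' j
          rcases lt_trichotomy j k with hj | hj | hj
          · obtain ⟨ha, hb⟩ := hΦ' j
            rw [hlow j hj] at ha hb
            refine ⟨ha, fun h1 => ?_⟩
            have := hb h1
            rw [PySem.Dict.contains_insert] at this
            have hne : ((j:Int) == (k:Int)) = false := by
              simp only [beq_eq_false_iff_ne, ne_eq, Int.natCast_inj]
              omega
            rw [hne] at this
            simpa using this
          · subst hj
            exact ⟨by omega, fun _ => hcf⟩
          · exact ⟨by rw [hhigh j hj]; omega, fun h => absurd h (by rw [hhigh j hj]; omega)⟩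
        · intro hΦ j
          rcases lt_trichotomy j k with hj | hj | hj
          · obtain ⟨ha, hb⟩ := hΦ j
            rw [hlow j hj]
            refine ⟨ha, fun h1 => ?_⟩
            have := hb h1
            rw [PySem.Dict.contains_insert]
            have hne : ((j:Int) == (k:Int)) = false := by
              simp only [beq_eq_false_iff_ne, ne_eq, Int.natCast_inj]
              omega
            rw [hne, this]
            simp
          · subst hj
            exact ⟨by rw [hdk'0]; omega, fun h => absurd h (by rw [hdk'0]; omega)⟩
          · exact ⟨by rw [hhigh' j hj]; omega, fun h => absurd h (by rw [hhigh' j hj]; omega)⟩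

-- ===== VERDICT (by name: the statement is the Claim_ definition above) =====
theorem recursive_check_spec : Claim_equal_recursive_check := by
  unfold Claim_equal_recursive_check Spec_recursive_check
  intro n ans _
  unfold recursive_check recursive_check_alt
  by_cases hn : n < 1
  · rw [Aloop, if_pos hn, if_pos hn]
  · rw [if_neg hn]
    have h1 : 1 ≤ n.toNat := by omega
    have hcast : ((n.toNat : Nat) : Int) = n := by omega
    have hA := Aloop_iff n.toNat h1 (PySem.Dict.mk ans)
    rw [hcast] at hA
    have hB := digitLoop_iff n.toNat 0 (PySem.Dict.mk ans)
    simp only [zero_add] at hB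
    have hiff := hA.trans hB.symm
    cases hres : Aloop n (PySem.Dict.mk ans) with
    | true => exact (hiff.mp hres).symm
    | false =>
      cases hres2 : digitLoop n.toNat 0 (PySem.Dict.mk ans) with
      | true => exact absurd (hiff.mpr hres2) (by simp [hres])
      | false => rfl
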